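-- pv_equiv track=rewrite | github.com/Koubae/Algorithm-Complete-Guide | Algorithms/src/Challanges/validate_subsequence/validate_subsequence.py | fifth_solution
-- ===== SOURCE A (Python) =====
-- def fifth_solution(array: list, sequence: list) -> bool:
--     """
--
--     """
--     if len(sequence) > len(array):
--         return False
--
--     sequence_map = {}
--
--     index_array = 0
--     found = []
--
--     for index_array in range(len(array)):
--         n = array[index_array]
--         index_array += 1
--         if n not in sequence:
--             continue
--         found.append(n)
--         if n in sequence_map:
--             continue
--
--         total_occurrency_array = array.count(n)
--         total_occurrency_sequence = sequence.count(n)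
--         if total_occurrency_array < total_occurrency_sequence:
--             return False
--         sequence_map[n] = True
--
--
--     found = found[:len(sequence)]
--     return found == sequence
-- ===== SOURCE B (Python) =====
-- def fifth_solution(array: list, sequence: list) -> bool:
--     j = 0
--     for x in array:
--         if x in sequence:
--             if j < len(sequence):
--                 if x != sequence[j]:
--                     return False
--                 j += 1
--     return j == len(sequence)
-- ===== Notes on version B (the rewrite author's own statement) =====
-- stated objective: faster
-- what changed: B streams over array once with a single index j into sequence, comparing matching elements inline and ignoring matches past len(sequence), instead of A's building a filtered list, running redundant array.count/sequence.count scans per distinct element, maintaining a seen-dict, then slicing and comparing.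
import Mathlib
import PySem

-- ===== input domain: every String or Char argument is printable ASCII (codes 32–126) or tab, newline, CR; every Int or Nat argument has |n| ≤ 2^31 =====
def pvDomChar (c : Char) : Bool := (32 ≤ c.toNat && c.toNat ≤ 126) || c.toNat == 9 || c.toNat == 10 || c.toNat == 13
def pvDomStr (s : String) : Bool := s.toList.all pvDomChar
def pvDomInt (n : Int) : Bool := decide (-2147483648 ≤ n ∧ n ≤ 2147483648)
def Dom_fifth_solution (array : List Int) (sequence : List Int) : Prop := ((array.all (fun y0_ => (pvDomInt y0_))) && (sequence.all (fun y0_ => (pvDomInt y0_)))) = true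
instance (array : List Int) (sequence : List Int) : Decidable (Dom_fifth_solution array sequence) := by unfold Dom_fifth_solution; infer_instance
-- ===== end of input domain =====

-- B streams a single index j into sequence instead of building and slicing a filtered list,
-- and drops A's (redundant) per-element count guard: a different decomposition of the same test.

-- ===== PORT A =====
-- A's loop over array: state = (found, sequence_map); 'none' = the early 'return False'.
def fifth_solution_loop (array sequence : List Int) :
    List Int → List Int → PySem.Dict Int Bool → Option (List Int)
  | [], found, _ => some found
  | n :: rest, found, smap =>
    if n ∈ sequence then
      let found' := found ++ [n]
      if (smap.get? n).isSome then
        fifth_solution_loop array sequence rest found' smap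
      else
        if array.count n < sequence.count n then none
        else fifth_solution_loop array sequence rest found' (smap.insert n true)
    else fifth_solution_loop array sequence rest found smap

def fifth_solution (array : List Int) (sequence : List Int) : Bool :=
  if sequence.length > array.length then false
  else
    match fifth_solution_loop array sequence array [] PySem.Dict.empty with
    | none => false
    | some found => decide (found.take sequence.length = sequence)

-- ===== PORT B =====
-- B's loop: index j into sequence; 'false' results propagate the early return.
def fifth_solution_alt_loop (sequence : List Int) : List Int → Nat → Bool
  | [], j => j == sequence.length
  | x :: rest, j =>
    if x ∈ sequence then
      if h : j < sequence.length then
        if x ≠ sequence[j] then false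
        else fifth_solution_alt_loop sequence rest (j + 1)
      else fifth_solution_alt_loop sequence rest j
    else fifth_solution_alt_loop sequence rest j

def fifth_solution_alt (array : List Int) (sequence : List Int) : Bool :=
  fifth_solution_alt_loop sequence array 0

-- ===== PRECONDITION & SPEC =====
def Spec_fifth_solution (array : List Int) (sequence : List Int) (out : Bool) : Prop := out = fifth_solution_alt array sequence
instance (array : List Int) (sequence : List Int) (out : Bool) : Decidable (Spec_fifth_solution array sequence out) := by unfold Spec_fifth_solution; infer_instance

-- ===== CLAIM (what is proved, stated in full; the proofs are below) =====
def Claim_equal_fifth_solution : Prop := ∀ (array : List Int) (sequence : List Int), Dom_fifth_solution array sequence → Spec_fifth_solution array sequence (fifth_solution array sequence)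

-- ===== LEMMAS AND PROOFS =====

-- B's loop computes: drop j of sequence equals the filtered remainder, truncated.
theorem altLoop_char (sequence : List Int) (l : List Int) (j : Nat) (hj : j ≤ sequence.length) :
    fifth_solution_alt_loop sequence l j
      = decide (sequence.drop j = (l.filter (· ∈ sequence)).take (sequence.length - j)) := by
  induction l generalizing j with
  | nil =>
    by_cases hje : j = sequence.length
    · simp [fifth_solution_alt_loop, hje]
    · have hle : ¬ sequence.length ≤ j := by omega
      simp [fifth_solution_alt_loop, hje, List.drop_eq_nil_iff, hle]
  | cons x rest ih =>
    rw [fifth_solution_alt_loop]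
    by_cases hx : x ∈ sequence
    · simp only [hx, if_true]
      by_cases hjl : j < sequence.length
      · rw [dif_pos hjl]
        have hdrop : sequence.drop j = sequence[j] :: sequence.drop (j + 1) :=
          List.drop_eq_getElem_cons hjl
        have htake : ((x :: rest).filter (· ∈ sequence)).take (sequence.length - j)
            = x :: (rest.filter (· ∈ sequence)).take (sequence.length - (j + 1)) := by
          have : sequence.length - j = (sequence.length - (j + 1)) + 1 := by omega
          simp [hx, this]
        rw [hdrop, htake]
        by_cases hxe : x = sequence[j]
        · have hne : ¬ (x ≠ sequence[j]) := by simpa using hxe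
          rw [if_neg hne, ih (j + 1) hjl, decide_eq_decide, List.cons_eq_cons]
          simp [hxe]
        · rw [if_pos hxe]
          refine (decide_eq_false ?_).symm
          intro h
          exact hxe ((List.cons_eq_cons.mp h).1).symm
      · rw [dif_neg hjl]
        have hjlen : j = sequence.length := by omega
        have h1 : sequence.drop j = [] := by simp [hjlen]
        have h2 : sequence.length - j = 0 := by omega
        rw [ih j hj]
        simp [h1, h2]
    · simp [hx, ih j hj]

-- A's loop, when it does not early-return, yields found ++ filter.
theorem aLoop_some (array sequence : List Int) (l found : List Int) (smap : PySem.Dict Int Bool)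
    (f : List Int) (h : fifth_solution_loop array sequence l found smap = some f) :
    f = found ++ l.filter (· ∈ sequence) := by
  induction l generalizing found smap with
  | nil => simp [fifth_solution_loop] at h; simp [h.symm]
  | cons n rest ih =>
    rw [fifth_solution_loop] at h
    by_cases hn : n ∈ sequence
    · simp only [hn, if_true] at h
      by_cases hm : (smap.get? n).isSome
      · rw [if_pos hm] at h
        have := ih _ _ h
        simp [this, hn]
      · rw [if_neg hm] at h
        by_cases hc : array.count n < sequence.count n
        · simp [hc] at h
        · rw [if_neg hc] at h
          have := ih _ _ h
          simp [this, hn]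
    · simp only [hn, if_false] at h
      have := ih _ _ h
      simp [this, hn]

-- A's loop early-returns only when some element has deficient count.
theorem aLoop_none (array sequence : List Int) (l found : List Int) (smap : PySem.Dict Int Bool)
    (h : fifth_solution_loop array sequence l found smap = none) :
    ∃ n, n ∈ l ∧ n ∈ sequence ∧ array.count n < sequence.count n := by
  induction l generalizing found smap with
  | nil => simp [fifth_solution_loop] at h
  | cons n rest ih =>
    rw [fifth_solution_loop] at h
    by_cases hn : n ∈ sequence
    · simp only [hn, if_true] at h
      by_cases hm : (smap.get? n).isSome
      · rw [if_pos hm] at h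
        obtain ⟨m, hm1, hm2, hm3⟩ := ih _ _ h
        exact ⟨m, List.mem_cons_of_mem _ hm1, hm2, hm3⟩
      · rw [if_neg hm] at h
        by_cases hc : array.count n < sequence.count n
        · exact ⟨n, List.mem_cons_self, hn, hc⟩
        · rw [if_neg hc] at h
          obtain ⟨m, hm1, hm2, hm3⟩ := ih _ _ h
          exact ⟨m, List.mem_cons_of_mem _ hm1, hm2, hm3⟩
    · simp only [hn, if_false] at h
      obtain ⟨m, hm1, hm2, hm3⟩ := ih _ _ h
      exact ⟨m, List.mem_cons_of_mem _ hm1, hm2, hm3⟩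

-- the count guard is redundant: deficient count forces the final comparison to fail.
theorem count_guard (array sequence : List Int) (n : Int) (hn : n ∈ sequence)
    (hc : array.count n < sequence.count n) :
    ((array.filter (· ∈ sequence)).take sequence.length ≠ sequence) := by
  intro heq
  have h1 : sequence.count n ≤ (array.filter (· ∈ sequence)).count n := by
    calc sequence.count n
        = ((array.filter (· ∈ sequence)).take sequence.length).count n := by rw [heq]
      _ ≤ (array.filter (· ∈ sequence)).count n :=
          (List.take_sublist _ _).count_le n
  have h2 : (array.filter (· ∈ sequence)).count n = array.count n := by
    rw [List.count_filter]
    simp [hn]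
  omega

-- ===== VERDICT (by name: the statement is the Claim_ definition above) =====
theorem fifth_solution_spec : Claim_equal_fifth_solution := by
  intro array sequence _
  unfold Spec_fifth_solution fifth_solution fifth_solution_alt
  have hB := altLoop_char sequence array 0 (Nat.zero_le _)
  simp only [List.drop_zero, Nat.sub_zero] at hB
  rw [hB]
  by_cases hlen : sequence.length > array.length
  · rw [if_pos hlen]
    have hne : sequence ≠ (array.filter (· ∈ sequence)).take sequence.length := by
      intro heq
      have h1 : ((array.filter (· ∈ sequence)).take sequence.length).length
          ≤ (array.filter (· ∈ sequence)).length := List.length_take_le' _ _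
      have h2 := List.length_filter_le (· ∈ sequence) array
      have h3 := congrArg List.length heq
      simp at h3
      omega
    simp [hne]
  · rw [if_neg hlen]
    cases hloop : fifth_solution_loop array sequence array [] PySem.Dict.empty with
    | none =>
      obtain ⟨n, _, hn2, hn3⟩ := aLoop_none array sequence array [] _ hloop
      have hg := count_guard array sequence n hn2 hn3
      have hne : ¬ (sequence = (array.filter (· ∈ sequence)).take sequence.length) :=
        fun h => hg h.symm
      simp [hne]
    | some f =>
      have hf := aLoop_some array sequence array [] _ f hloop
      simp only [List.nil_append] at hf
      subst hf
      simp [eq_comm]
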